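-- pv_equiv track=rewrite | github.com/openstack-archive/tripleo-ansible | tripleo_ansible/ansible_plugins/modules/tripleo_container_manage.py | batch_start_order
-- ===== SOURCE A (Python) =====
-- def batch_start_order(configs):
--     data = {}
--     for k in configs:
--         start_order = configs[k].get('start_order', 0)
--         if start_order not in data:
--             data[start_order] = []
--         data[start_order].append((k, configs.get(k)))
--     return data
-- ===== SOURCE B (Python) =====
-- def batch_start_order(configs):
--     def order(v):
--         return v.get('start_order', 0)
--     orders = dict.fromkeys(order(v) for v in configs.values())
--     return {o: [(k, v) for k, v in configs.items() if order(v) == o]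
--             for o in orders}
-- ===== Notes on version B (the rewrite author's own statement) =====
-- stated objective: alternative
-- what changed: Replaces A's single-pass 'create bucket if absent then append' dict mutation by first deduplicating the start_order values (dict.fromkeys) and then building each bucket with one filtering comprehension over configs.items(); output order (first-seen buckets, original entry order) is identical.
import Mathlib
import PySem

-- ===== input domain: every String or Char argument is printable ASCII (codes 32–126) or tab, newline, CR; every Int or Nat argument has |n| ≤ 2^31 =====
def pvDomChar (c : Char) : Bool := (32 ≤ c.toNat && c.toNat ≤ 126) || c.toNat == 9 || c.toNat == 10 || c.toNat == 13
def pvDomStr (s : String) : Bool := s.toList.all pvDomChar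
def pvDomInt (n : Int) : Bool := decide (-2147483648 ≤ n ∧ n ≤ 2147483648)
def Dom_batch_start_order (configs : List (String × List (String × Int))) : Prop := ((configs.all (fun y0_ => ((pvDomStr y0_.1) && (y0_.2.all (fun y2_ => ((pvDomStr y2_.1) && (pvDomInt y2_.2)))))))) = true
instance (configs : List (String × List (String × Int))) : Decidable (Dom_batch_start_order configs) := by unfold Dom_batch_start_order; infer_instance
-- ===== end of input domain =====

-- B replaces A's one-pass membership-check-and-append bucketing by first deduplicating the
-- start_orders (dict.fromkeys) and then building each bucket with one filtering comprehension
-- (objective: alternative decomposition; same values, including bucket and entry order).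

-- ===== PORT A =====
-- A iterates over the dict's keys, looks the value up, and appends into data[start_order],
-- creating the empty bucket first when absent.
def batch_start_order (configs : List (String × List (String × Int))) :
    List (Int × List (String × (List (String × Int)))) :=
  let cfg : PySem.Dict String (PySem.Dict String Int) :=
    PySem.Dict.ofList (configs.map (fun p => (p.1, PySem.Dict.ofList p.2)))
  let data : PySem.Dict Int (List (String × (List (String × Int)))) :=
    cfg.keys.foldl
      (fun data k =>
        let start_order : Int := (cfg.getD k PySem.Dict.empty).getD "start_order" 0
        let data := if data.contains start_order then data
                    else data.insert start_order []
        data.modify start_order []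
          (fun bucket => bucket ++ [(k, (cfg.getD k PySem.Dict.empty).items)]))
      PySem.Dict.empty
  data.items

-- ===== PORT B =====
-- orders = dict.fromkeys(order(v) for v in configs.values()); then one filter per order.
def batch_start_order_alt (configs : List (String × List (String × Int))) :
    List (Int × List (String × (List (String × Int)))) :=
  let cfg : PySem.Dict String (PySem.Dict String Int) :=
    PySem.Dict.ofList (configs.map (fun p => (p.1, PySem.Dict.ofList p.2)))
  let order : PySem.Dict String Int → Int := fun v => v.getD "start_order" 0
  let orders : List Int := PySem.List.dedup (cfg.values.map order)
  orders.map (fun o =>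
    (o, (cfg.items.filter (fun kv => order kv.2 == o)).map (fun kv => (kv.1, kv.2.items))))

-- ===== PRECONDITION & SPEC =====
def Spec_batch_start_order (configs : List (String × List (String × Int))) (out : List (Int × List (String × (List (String × Int))))) : Prop := out = batch_start_order_alt configs
instance (configs : List (String × List (String × Int))) (out : List (Int × List (String × (List (String × Int))))) : Decidable (Spec_batch_start_order configs out) := by unfold Spec_batch_start_order; infer_instance

-- ===== CLAIM (what is proved, stated in full; the proofs are below) =====
def Claim_equal_batch_start_order : Prop := ∀ (configs : List (String × List (String × Int))), Dom_batch_start_order configs → Spec_batch_start_order configs (batch_start_order configs)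

-- ===== LEMMAS AND PROOFS =====

-- A's "create empty bucket if absent, then append" is one modify with default [].
theorem pv_if_insert_modify {κ : Type} [BEq κ] [LawfulBEq κ]
    (d : PySem.Dict κ (List α)) (k : κ) (f : List α → List α) :
    ((if d.contains k then d else d.insert k []).modify k [] f) = d.modify k [] f := by
  by_cases h : d.contains k
  · simp [h]
  · have hf : d.contains k = false := by simpa using h
    apply PySem.Dict.ext
    simp only [PySem.Dict.modify]
    rw [if_neg h]
    rw [PySem.Dict.getD_insert_self, PySem.Dict.getD_of_not_contains _ _ hf]
    rw [PySem.Dict.items_insert_of_contains _ _ (PySem.Dict.contains_insert_self _ _ _),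
        PySem.Dict.items_insert_of_not_contains _ _ hf,
        PySem.Dict.items_insert_of_not_contains _ _ hf]
    have hmap : ∀ p ∈ d.items, (if p.1 == k then (k, f []) else p) = p := by
      intro p hp
      have : (p.1 == k) = false := by
        by_contra hc
        have : d.contains k = true := by
          simp only [PySem.Dict.contains]
          exact List.any_eq_true.mpr ⟨p, hp, by simpa using hc⟩
        simp [this] at hf
      simp [this]
    simp [List.map_append, List.map_congr_left hmap]

-- The grouping fact, for any dict with distinct keys.
theorem pv_grouping (d : PySem.Dict String (PySem.Dict String Int)) (hnd : d.keys.Nodup) :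
    (d.keys.foldl
      (fun data k =>
        let start_order : Int := (d.getD k PySem.Dict.empty).getD "start_order" 0
        let data := if data.contains start_order then data
                    else data.insert start_order []
        data.modify start_order []
          (fun bucket => bucket ++ [(k, (d.getD k PySem.Dict.empty).items)]))
      PySem.Dict.empty).items
    = (PySem.List.dedup (d.values.map (fun v => v.getD "start_order" 0))).map (fun o =>
        (o, (d.items.filter (fun kv => kv.2.getD "start_order" 0 == o)).map
              (fun kv => (kv.1, kv.2.items)))) := by
  -- collapse the conditional insert into a single modify
  have h1 : (d.keys.foldl
      (fun data k =>
        let start_order : Int := (d.getD k PySem.Dict.empty).getD "start_order" 0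
        let data := if data.contains start_order then data
                    else data.insert start_order []
        data.modify start_order []
          (fun bucket => bucket ++ [(k, (d.getD k PySem.Dict.empty).items)]))
      PySem.Dict.empty)
      = (d.items.map (fun kv => ((kv.2.getD "start_order" 0 : Int), (kv.1, kv.2.items)))).foldl
          (fun data p => data.modify p.1 [] (fun bucket => bucket ++ [p.2]))
          PySem.Dict.empty := by
    rw [List.foldl_map]
    show d.keys.foldl _ _ = _
    have hkeys : d.keys = d.items.map (fun p => p.1) := rfl
    rw [hkeys, List.foldl_map]
    apply PySem.List.foldl_congr_mem
    intro acc p hp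
    have hget : d.getD p.1 PySem.Dict.empty = p.2 :=
      PySem.Dict.getD_of_mem_items d (k := p.1) (v := p.2) (by simpa using hp) hnd PySem.Dict.empty
    simp only [hget]
    exact pv_if_insert_modify acc _ _
  rw [h1]
  set L := d.items.map (fun kv => ((kv.2.getD "start_order" 0 : Int), (kv.1, kv.2.items))) with hL
  set r := L.foldl (fun data p => data.modify p.1 [] (fun bucket => bucket ++ [p.2]))
      PySem.Dict.empty with hr
  have hbody : r = L.foldl
      (fun data p => data.modify p.1 [] ((fun (_ : PySem.Dict Int (List (String × (List (String × Int))))) (p : Int × (String × (List (String × Int)))) => (fun bucket => bucket ++ [p.2])) data p))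
      PySem.Dict.empty := rfl
  have hkeysr : r.keys = PySem.List.dedup (L.map (fun p => p.1)) := by
    rw [hbody, PySem.Dict.keys_foldl_modify_key]
    simp [PySem.Set.update_nil_left]
  have hnodr : r.keys.Nodup := by
    rw [hbody]
    exact PySem.Dict.nodup_keys_foldl_modify_key _ _ _ _ _ (by simp)
  have hitems := PySem.Dict.items_eq_map_keys r hnodr []
  rw [hitems, hkeysr]
  have hfst : L.map (fun p => p.1) = d.values.map (fun v => v.getD "start_order" 0) := by
    simp [hL, PySem.Dict.values, List.map_map, Function.comp]
  rw [hfst]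
  apply List.map_congr_left
  intro o _
  have hgetD : r.getD o [] = (L.filter (fun p => p.1 == o)).map (fun p => p.2) := by
    rw [hr, PySem.Dict.getD_foldl_modify_append]
    simp
  rw [hgetD]
  simp only [hL, List.filter_map, List.map_map]
  rfl

-- ===== VERDICT (by name: the statement is the Claim_ definition above) =====
theorem batch_start_order_spec : Claim_equal_batch_start_order := by
  intro configs _
  show batch_start_order configs = batch_start_order_alt configs
  unfold batch_start_order batch_start_order_alt
  exact pv_grouping _ (PySem.Dict.nodup_keys_ofList _)
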